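-- pv_equiv track=rewrite | github.com/globoxx/book | src/appr/data/projets_eleves/Generateur_mdp.py | charPossible
-- ===== SOURCE A (Python) =====
-- def charPossible(maj, nombre, charSpeciaux, charAmbigu):#genere tous les characteres possibles du mot de passe dans une liste avec les conditions données par les checkboxs
--     charPossible = []
--     for i in range(97, 123):
--         if charAmbigu == False or i != 108: #enlève le l miniscule si charAmbigu est true
--             charPossible.append(chr(i)) #la fonction chr() transforme un int en charactere ascii
--     if maj == True:
--         for i in range(65, 91):
--             if charAmbigu == False or (i != 73 and i != 79): #enlève le o et le i majuscule si charAmbigu est true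
--                 charPossible.append(chr(i))
--     if nombre == True:
--         for i in range(48, 58):
--             if charAmbigu == False or i != 48: #enlève le 0 si charAmbigu est true
--                 charPossible.append(chr(i))
--     if charSpeciaux == True:
--         for i in range(33, 48):
--             charPossible.append(chr(i))
--         for i in range(58, 65):
--             charPossible.append(chr(i))
--         for i in range(91, 97):
--             charPossible.append(chr(i))
--         for i in range(123, 127):
--             charPossible.append(chr(i))
--     return charPossible
-- ===== SOURCE B (Python) =====
-- LOWER = "abcdefghijklmnopqrstuvwxyz"
-- UPPER = "ABCDEFGHIJKLMNOPQRSTUVWXYZ"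
-- DIGITS = "0123456789"
-- SPECIAL = "!\"#$%&'()*+,-./:;<=>?@[\\]^_`{|}~"
-- AMBIGUOUS = "lIO0"
--
-- def charPossible(maj, nombre, charSpeciaux, charAmbigu):
--     chars = LOWER
--     if maj == True:
--         chars += UPPER
--     if nombre == True:
--         chars += DIGITS
--     if charSpeciaux == True:
--         chars += SPECIAL
--     if charAmbigu != False:
--         return [c for c in chars if c not in AMBIGUOUS]
--     return list(chars)
-- ===== Notes on version B (the rewrite author's own statement) =====
-- stated objective: idiomatic
-- what changed: B replaces the four per-range integer loops with chr() and in-loop ambiguity tests by concatenating precomputed character-class string constants and then doing one separate filtering pass that removes the ambiguous characters l, I, O, 0.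
import Mathlib
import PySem

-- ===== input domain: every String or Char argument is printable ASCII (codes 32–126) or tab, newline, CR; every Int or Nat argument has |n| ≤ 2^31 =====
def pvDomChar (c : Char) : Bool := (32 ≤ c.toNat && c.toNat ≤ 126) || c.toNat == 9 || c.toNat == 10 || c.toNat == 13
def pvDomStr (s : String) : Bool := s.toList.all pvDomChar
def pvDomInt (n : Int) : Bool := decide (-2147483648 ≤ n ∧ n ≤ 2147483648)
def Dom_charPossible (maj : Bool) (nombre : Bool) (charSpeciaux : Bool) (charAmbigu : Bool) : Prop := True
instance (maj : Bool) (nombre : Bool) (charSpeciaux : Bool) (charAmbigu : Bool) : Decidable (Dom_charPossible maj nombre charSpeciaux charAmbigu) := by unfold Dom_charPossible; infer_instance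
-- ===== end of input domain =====

-- B builds the allowed set from precomputed character-class constants plus one
-- separate ambiguous-character filtering pass, instead of A's per-range integer
-- loops with in-loop tests (objective: more idiomatic; same cost).

-- ===== PORT A =====
-- chr(i) on 33 ≤ i ≤ 126 is exactly Char.ofNat i.toNat (ASCII, i positive here)
def charPossible (maj : Bool) (nombre : Bool) (charSpeciaux : Bool) (charAmbigu : Bool) : List String :=
  let cp : List String := (PySem.List.pyRange 97 123 1).foldl (fun acc i =>
    if charAmbigu == false || i != 108 then acc ++ [String.ofList [Char.ofNat i.toNat]] else acc) []
  let cp := if maj == true then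
      (PySem.List.pyRange 65 91 1).foldl (fun acc i =>
        if charAmbigu == false || (i != 73 && i != 79) then acc ++ [String.ofList [Char.ofNat i.toNat]] else acc) cp
    else cp
  let cp := if nombre == true then
      (PySem.List.pyRange 48 58 1).foldl (fun acc i =>
        if charAmbigu == false || i != 48 then acc ++ [String.ofList [Char.ofNat i.toNat]] else acc) cp
    else cp
  let cp := if charSpeciaux == true then
      let cp := (PySem.List.pyRange 33 48 1).foldl (fun acc i => acc ++ [String.ofList [Char.ofNat i.toNat]]) cp
      let cp := (PySem.List.pyRange 58 65 1).foldl (fun acc i => acc ++ [String.ofList [Char.ofNat i.toNat]]) cp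
      let cp := (PySem.List.pyRange 91 97 1).foldl (fun acc i => acc ++ [String.ofList [Char.ofNat i.toNat]]) cp
      (PySem.List.pyRange 123 127 1).foldl (fun acc i => acc ++ [String.ofList [Char.ofNat i.toNat]]) cp
    else cp
  cp

-- ===== PORT B =====
def pvLower : String := "abcdefghijklmnopqrstuvwxyz"
def pvUpper : String := "ABCDEFGHIJKLMNOPQRSTUVWXYZ"
def pvDigits : String := "0123456789"
def pvSpecial : String := "!\"#$%&'()*+,-./:;<=>?@[\\]^_`{|}~"
def pvAmbiguous : String := "lIO0"

def charPossible_alt (maj : Bool) (nombre : Bool) (charSpeciaux : Bool) (charAmbigu : Bool) : List String :=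
  let chars := pvLower
  let chars := if maj == true then chars ++ pvUpper else chars
  let chars := if nombre == true then chars ++ pvDigits else chars
  let chars := if charSpeciaux == true then chars ++ pvSpecial else chars
  if charAmbigu != false then
    (chars.toList.filter (fun c => !(pvAmbiguous.toList.contains c))).map (fun c => String.ofList [c])
  else
    chars.toList.map (fun c => String.ofList [c])

-- ===== PRECONDITION & SPEC =====
def Spec_charPossible (maj : Bool) (nombre : Bool) (charSpeciaux : Bool) (charAmbigu : Bool) (out : List String) : Prop := out = charPossible_alt maj nombre charSpeciaux charAmbigu
instance (maj : Bool) (nombre : Bool) (charSpeciaux : Bool) (charAmbigu : Bool) (out : List String) : Decidable (Spec_charPossible maj nombre charSpeciaux charAmbigu out) := by unfold Spec_charPossible; infer_instance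

-- ===== CLAIM (what is proved, stated in full; the proofs are below) =====
def Claim_equal_charPossible : Prop := ∀ (maj : Bool) (nombre : Bool) (charSpeciaux : Bool) (charAmbigu : Bool), Dom_charPossible maj nombre charSpeciaux charAmbigu → Spec_charPossible maj nombre charSpeciaux charAmbigu (charPossible maj nombre charSpeciaux charAmbigu)

-- ===== LEMMAS AND PROOFS =====

-- ===== VERDICT (by name: the statement is the Claim_ definition above) =====
theorem charPossible_spec : Claim_equal_charPossible := by
  intro maj nombre charSpeciaux charAmbigu _
  unfold Spec_charPossible
  cases maj <;> cases nombre <;> cases charSpeciaux <;> cases charAmbigu <;> decide
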